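-- pv_equiv track=rewrite | github.com/wie-florian/vu-gpa | GPA/blatt3.py | mystery_string
-- ===== SOURCE A (Python) =====
-- def mystery_string(line):
--     """
--     line -- str mit len(line) >= 1
--     """
--     if len(line) == 1:
--         return line
--     ret = mystery_string(line[1:])
--     if ret[0] == '9':
--         return ret
--     else:
--         return line
-- ===== SOURCE B (Python) =====
-- def mystery_string(line):
--     for i in range(len(line) - 1, -1, -1):
--         if line[i] == '9':
--             return line[i:]
--     return line
-- ===== Notes on version B (the rewrite author's own statement) =====
-- stated objective: faster
-- what changed: Replaced the suffix-building recursion (n recursion levels, each slicing the string) with a single backward index scan returning the suffix at the last '9', maintaining only an index.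
import Mathlib
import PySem

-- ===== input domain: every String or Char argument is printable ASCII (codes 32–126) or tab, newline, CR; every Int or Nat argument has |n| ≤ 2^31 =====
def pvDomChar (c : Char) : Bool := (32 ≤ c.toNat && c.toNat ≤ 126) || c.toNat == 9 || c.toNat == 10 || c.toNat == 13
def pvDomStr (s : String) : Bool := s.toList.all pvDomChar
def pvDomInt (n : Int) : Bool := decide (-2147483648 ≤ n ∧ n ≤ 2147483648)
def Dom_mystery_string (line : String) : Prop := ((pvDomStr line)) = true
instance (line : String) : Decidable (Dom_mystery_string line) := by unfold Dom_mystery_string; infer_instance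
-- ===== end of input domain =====

-- B replaces A's suffix-building recursion by a single backward index scan (one pass, measured faster);
-- on the empty string A infinitely recurses (excluded by Pre_) while B returns "".

-- ===== PORT A =====
-- recursion of A on the character list; the [] case is unreachable under Pre_ (Python diverges there)
def pvGoA : List Char → List Char
  | [] => []
  | [c] => [c]
  | c :: rest =>
      let ret := pvGoA rest
      if ret.getD 0 ' ' = '9' then ret else c :: rest

def mystery_string (line : String) : String := String.ofList (pvGoA line.toList)

-- ===== PORT B =====
-- backward loop: i runs len-1, …, 0; argument is (current index + 1)
def pvScanB (cs : List Char) : Nat → List Char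
  | 0 => cs
  | i + 1 => if cs.getD i ' ' = '9' then cs.drop i else pvScanB cs i

def mystery_string_alt (line : String) : String :=
  String.ofList (pvScanB line.toList line.toList.length)

-- ===== PRECONDITION & SPEC =====
-- Pre_ excludes only the empty string, on which the Python A recurses forever (RecursionError).
def Pre_mystery_string (line : String) : Prop := line ≠ ""
instance (line : String) : Decidable (Pre_mystery_string line) := by unfold Pre_mystery_string; infer_instance
def pvWitness_mystery_string : String := "a9b"

def Spec_mystery_string (line : String) (out : String) : Prop := out = mystery_string_alt line
instance (line : String) (out : String) : Decidable (Spec_mystery_string line out) := by unfold Spec_mystery_string; infer_instance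

-- ===== CLAIM (what is proved, stated in full; the proofs are below) =====
def Claim_equal_mystery_string : Prop := ∀ (line : String), Dom_mystery_string line → Pre_mystery_string line → Spec_mystery_string line (mystery_string line)

-- ===== LEMMAS AND PROOFS =====

-- index of the last '9' in the list, if any
def pvLast9 : List Char → Option Nat
  | [] => none
  | c :: rest =>
      match pvLast9 rest with
      | some j => some (j + 1)
      | none => if c = '9' then some 0 else none

lemma pvLast9_cons_some (c : Char) (rest : List Char) (j : Nat) (h : pvLast9 rest = some j) :
    pvLast9 (c :: rest) = some (j + 1) := by
  unfold pvLast9; rw [h]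

lemma pvLast9_cons_none (c : Char) (rest : List Char) (h : pvLast9 rest = none) :
    pvLast9 (c :: rest) = if c = '9' then some 0 else none := by
  unfold pvLast9; rw [h]

lemma pvLast9_spec : ∀ (l : List Char) (j : Nat), pvLast9 l = some j →
    j < l.length ∧ l.getD j ' ' = '9' := by
  intro l
  induction l with
  | nil => intro j h; simp [pvLast9] at h
  | cons c rest ih =>
    intro j h
    cases hr : pvLast9 rest with
    | some j' =>
      rw [pvLast9_cons_some c rest j' hr] at h
      injection h with h
      subst h
      obtain ⟨h1, h2⟩ := ih j' hr
      exact ⟨by simpa using Nat.succ_lt_succ h1, by simpa using h2⟩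
    | none =>
      rw [pvLast9_cons_none c rest hr] at h
      by_cases hc : c = '9'
      · rw [if_pos hc] at h
        injection h with h
        subst h
        exact ⟨by simp, by simpa using hc⟩
      · rw [if_neg hc] at h
        exact absurd h (by simp)

lemma pvLast9_none_head (c : Char) (rest : List Char) (h : pvLast9 (c :: rest) = none) :
    c ≠ '9' := by
  cases hr : pvLast9 rest with
  | some j' => rw [pvLast9_cons_some c rest j' hr] at h; simp at h
  | none =>
    rw [pvLast9_cons_none c rest hr] at h
    intro hc
    rw [if_pos hc] at h
    simp at h

lemma pvLast9_append_singleton (xs : List Char) (c : Char) :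
    pvLast9 (xs ++ [c]) = if c = '9' then some xs.length else pvLast9 xs := by
  induction xs with
  | nil =>
    show pvLast9 [c] = _
    rw [pvLast9_cons_none c [] rfl]
    rfl
  | cons x xs ih =>
    rw [List.cons_append]
    cases hr : pvLast9 (xs ++ [c]) with
    | some j =>
      rw [pvLast9_cons_some x _ j hr]
      rw [ih] at hr
      by_cases hc : c = '9'
      · rw [if_pos hc] at hr ⊢
        injection hr with hr
        simp [← hr]
      · rw [if_neg hc] at hr ⊢
        rw [pvLast9_cons_some x xs j hr]
    | none =>
      rw [pvLast9_cons_none x _ hr]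
      rw [ih] at hr
      by_cases hc : c = '9'
      · rw [if_pos hc] at hr; simp at hr
      · rw [if_neg hc] at hr ⊢
        rw [pvLast9_cons_none x xs hr]

lemma pvGoA_eq : ∀ (l : List Char), l ≠ [] →
    pvGoA l = match pvLast9 l with | some j => l.drop j | none => l := by
  intro l
  induction l with
  | nil => intro h; exact absurd rfl h
  | cons c rest ih =>
    intro _
    cases rest with
    | nil =>
      show [c] = _
      cases hr : pvLast9 [c] with
      | some j =>
        obtain ⟨hj, hv⟩ := pvLast9_spec _ _ hr
        have : j = 0 := by simpa using hj
        subst this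
        simp
      | none => rfl
    | cons r rs =>
      have hne : r :: rs ≠ [] := by simp
      have ihr := ih hne
      show (let ret := pvGoA (r :: rs); if ret.getD 0 ' ' = '9' then ret else c :: r :: rs) = _
      cases hr : pvLast9 (r :: rs) with
      | some j =>
        obtain ⟨hj, hv⟩ := pvLast9_spec _ _ hr
        rw [ihr, hr]
        have hhead : ((r :: rs).drop j).getD 0 ' ' = '9' := by
          rw [List.getD_eq_getElem?_getD, List.getElem?_drop, Nat.add_zero,
              ← List.getD_eq_getElem?_getD]
          exact hv
        show (if ((r :: rs).drop j).getD 0 ' ' = '9' then (r :: rs).drop j else c :: r :: rs) = _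
        rw [if_pos hhead, pvLast9_cons_some c _ j hr]
        rfl
      | none =>
        rw [ihr, hr]
        have hrne : r ≠ '9' := pvLast9_none_head r rs hr
        show (if (r :: rs).getD 0 ' ' = '9' then r :: rs else c :: r :: rs) = _
        rw [List.getD_cons_zero, if_neg hrne, pvLast9_cons_none c _ hr]
        by_cases hc : c = '9'
        · rw [if_pos hc]; rfl
        · rw [if_neg hc]

lemma pvScanB_eq : ∀ (i : Nat) (cs : List Char), i ≤ cs.length →
    pvScanB cs i = match pvLast9 (cs.take i) with | some j => cs.drop j | none => cs := by
  intro i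
  induction i with
  | zero => intro cs _; simp [pvScanB, pvLast9]
  | succ i ih =>
    intro cs hlen
    have hi : i < cs.length := hlen
    have htake : cs.take (i + 1) = cs.take i ++ [cs[i]] := List.take_succ_eq_append_getElem hi
    have hgetD : cs.getD i ' ' = cs[i] := List.getD_eq_getElem cs ' ' hi
    show (if cs.getD i ' ' = '9' then cs.drop i else pvScanB cs i) = _
    rw [htake, pvLast9_append_singleton, hgetD]
    by_cases hc : cs[i] = '9'
    · rw [if_pos hc, if_pos hc, List.length_take_of_le (Nat.le_of_lt hi)]
    · rw [if_neg hc, if_neg hc]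
      exact ih cs (Nat.le_of_lt hi)

lemma pvGoA_eq_pvScanB (l : List Char) (h : l ≠ []) :
    pvGoA l = pvScanB l l.length := by
  rw [pvGoA_eq l h, pvScanB_eq l.length l (Nat.le_refl _), List.take_length]

-- ===== VERDICT (by name: the statement is the Claim_ definition above) =====
theorem mystery_string_spec : Claim_equal_mystery_string := by
  intro line _ hpre
  unfold Spec_mystery_string mystery_string mystery_string_alt
  have hne : line.toList ≠ [] := by
    intro h
    exact hpre (by simpa using congrArg String.ofList h)
  rw [pvGoA_eq_pvScanB _ hne]
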